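-- pv_equiv track=rewrite | github.com/pypi-data/pypi-mirror-207 | packages/kng/kng-0.6.1.tar.gz/kng-0.6.1/kng/iter.py | list_2d
-- ===== SOURCE A (Python) =====
-- def list_2d(arr: list, row_size: int, fill_end=None) -> list[list]:
--     """convert 1D list to 2D list, aka. rows
--
--     Examples:
--         >>> list_2d([1,2,3,4,5], row_size=2)
--         [[1, 2], [3, 4], [5]]
--
--         >>> list_2d([1,2,3,4,5], row_size=2, fill_end=0)
--         [[1, 2], [3, 4], [5, 0]]
--
--
--     Args:
--         arr (list): 1D list
--         row_size (int): len of the rows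
--         fill_end (Any, optional): obj to fill the last chuck. None means don't fill.
--     """
--     op = []
--     for i in range(0, len(arr), row_size):
--         row = arr[i : i + row_size]
--         if fill_end is not None and len(row) < row_size:
--             shortage = row_size - len(row)
--             row = row + [fill_end] * shortage
--         op.append(row)
--     return op
-- ===== SOURCE B (Python) =====
-- def list_2d(arr: list, row_size: int, fill_end=None) -> list:
--     """Single forward pass: grow the current row element by element, flush it
--     when full; pad only the trailing partial row at the end."""
--     op = []
--     row = []
--     for x in arr:
--         row.append(x)
--         if len(row) == row_size:
--             op.append(row)
--             row = []
--     if row: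
--         if fill_end is not None:
--             row = row + [fill_end] * (row_size - len(row))
--         op.append(row)
--     return op
-- ===== Notes on version B (the rewrite author's own statement) =====
-- stated objective: alternative
-- what changed: B makes one element-by-element forward pass with a current-row accumulator that is flushed when it reaches row_size, padding only the trailing partial row after the loop, instead of A's index-arithmetic loop over range(0, len, row_size) that slices each row and conditionally pads inside the loop.
-- outside the precondition, e.g. on list_2d([1, 2, 3], -2, None): A returns [], B returns [[1, 2, 3]]
import Mathlib
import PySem

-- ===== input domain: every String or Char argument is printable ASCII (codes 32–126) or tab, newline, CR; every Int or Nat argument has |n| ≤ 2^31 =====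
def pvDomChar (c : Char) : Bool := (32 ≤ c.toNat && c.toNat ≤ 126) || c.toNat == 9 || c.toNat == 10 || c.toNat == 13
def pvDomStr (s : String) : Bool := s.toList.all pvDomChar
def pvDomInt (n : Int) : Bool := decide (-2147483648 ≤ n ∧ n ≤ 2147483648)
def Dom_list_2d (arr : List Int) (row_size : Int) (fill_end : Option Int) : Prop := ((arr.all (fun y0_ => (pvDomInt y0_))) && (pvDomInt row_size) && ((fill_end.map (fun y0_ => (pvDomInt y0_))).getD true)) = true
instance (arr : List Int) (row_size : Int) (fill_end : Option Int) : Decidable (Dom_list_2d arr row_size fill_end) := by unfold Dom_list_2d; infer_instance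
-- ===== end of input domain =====

-- B replaces A's stride/slice loop with a single element-by-element pass that
-- accumulates the current row and flushes it when full; same cost, different algorithm.

-- ===== PORT A =====
-- literal port of A: loop over range(0, len(arr), row_size), slice a row,
-- conditionally pad the short row, append it to the accumulator.
def list_2d (arr : List Int) (row_size : Int) (fill_end : Option Int) : List (List Int) :=
  (PySem.List.pyRange 0 arr.length row_size).foldl
    (fun op i =>
      op ++ [(
        let row := PySem.List.slice arr (some i) (some (i + row_size))
        match fill_end with
        | some v =>
            if (row.length : Int) < row_size then
              row ++ PySem.List.pyRepeat [v] (row_size - row.length)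
            else row
        | none => row)]) []

-- ===== PORT B =====
-- literal port of B: fold over the elements, growing the current row and
-- flushing it when its length reaches row_size; after the loop, pad and append
-- the trailing partial row if nonempty.
def list_2d_alt (arr : List Int) (row_size : Int) (fill_end : Option Int) : List (List Int) :=
  let st := arr.foldl
    (fun (st : List (List Int) × List Int) x =>
      let row := st.2 ++ [x]
      if (row.length : Int) = row_size then (st.1 ++ [row], []) else (st.1, row))
    ([], [])
  if st.2 ≠ [] then
    match fill_end with
    | some v => st.1 ++ [st.2 ++ PySem.List.pyRepeat [v] (row_size - st.2.length)]
    | none => st.1 ++ [st.2]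
  else st.1

-- ===== PRECONDITION & SPEC =====
-- Pre_ excludes row_size ≤ 0: at row_size = 0 A raises ValueError (range step 0),
-- and negative row_size is outside the task's natural domain (A accidentally
-- returns [] there, from the empty range).
def Pre_list_2d (arr : List Int) (row_size : Int) (fill_end : Option Int) : Prop :=
  1 ≤ row_size
instance (arr : List Int) (row_size : Int) (fill_end : Option Int) : Decidable (Pre_list_2d arr row_size fill_end) := by unfold Pre_list_2d; infer_instance
def pvWitness_list_2d : List Int × Int × Option Int := ([1, 2, 3, 4, 5], 2, some 0)

def Spec_list_2d (arr : List Int) (row_size : Int) (fill_end : Option Int) (out : List (List Int)) : Prop := out = list_2d_alt arr row_size fill_end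
instance (arr : List Int) (row_size : Int) (fill_end : Option Int) (out : List (List Int)) : Decidable (Spec_list_2d arr row_size fill_end out) := by unfold Spec_list_2d; infer_instance

-- ===== CLAIM (what is proved, stated in full; the proofs are below) =====
def Claim_equal_list_2d : Prop := ∀ (arr : List Int) (row_size : Int) (fill_end : Option Int), Dom_list_2d arr row_size fill_end → Pre_list_2d arr row_size fill_end → Spec_list_2d arr row_size fill_end (list_2d arr row_size fill_end)
-- ===== LEMMAS AND PROOFS =====

-- canonical chunking of a list into rows of rs elements (last row may be short)
def chunks (rs : Nat) : List Int → List (List Int)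
  | [] => []
  | x :: xs => (x :: xs.take (rs - 1)) :: chunks rs (xs.drop (rs - 1))
termination_by l => l.length
decreasing_by simp only [List.length_drop, List.length_cons]; omega

theorem chunks_nil (rs : Nat) : chunks rs [] = [] := by rw [chunks]

theorem chunks_cons (rs : Nat) (x : Int) (xs : List Int) :
    chunks rs (x :: xs) = (x :: xs.take (rs - 1)) :: chunks rs (xs.drop (rs - 1)) := by
  rw [chunks]

-- A's per-row padding, as a function of the row
def padIf (rs : Int) (fe : Option Int) (row : List Int) : List Int :=
  match fe with
  | some v =>
      if (row.length : Int) < rs then row ++ PySem.List.pyRepeat [v] (rs - row.length)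
      else row
  | none => row

-- number of chunks A's range produces
def cnt (rs : Int) (arr : List Int) : Nat :=
  if 0 < (arr.length : Int) then (((arr.length : Int) + rs - 1) / rs).toNat else 0

theorem foldl_append_singleton {α β : Type} (f : α → β) (xs : List α) (acc : List β) :
    xs.foldl (fun op i => op ++ [f i]) acc = acc ++ xs.map f := by
  induction xs generalizing acc with
  | nil => simp
  | cons x xs ih => simp [List.foldl_cons, ih]

-- slice shift: moving the window right by rs is slicing the rs-dropped list
theorem slice_shift (arr : List Int) (i rs : Int) (hi : 0 ≤ i) (hrs : 0 ≤ rs) :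
    PySem.List.slice arr (some (i + rs)) (some (i + rs + rs)) =
      PySem.List.slice (arr.drop rs.toNat) (some i) (some (i + rs)) := by
  rw [PySem.List.slice_toNat arr (by omega) (by omega),
    PySem.List.slice_toNat _ hi (by omega), List.drop_drop]
  congr 1
  · omega
  · congr 1
    omega

-- A's mapped slice windows over range(cnt) are exactly the canonical chunks
theorem map_slice_eq_chunks (rs : Int) (hrs : 0 < rs) :
    ∀ (n : Nat) (arr : List Int), arr.length = n →
      (List.range (cnt rs arr)).map
        (fun k : Nat => PySem.List.slice arr (some (rs * k)) (some (rs * k + rs))) =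
        chunks rs.toNat arr := by
  intro n
  induction n using Nat.strong_induction_on with
  | _ n ih =>
    intro arr hlen
    match arr with
    | [] => simp [cnt, chunks_nil]
    | x :: xs =>
      have hn : 0 < n := by rw [← hlen]; simp
      have hpos : (0 : Int) < ((x :: xs).length : Int) := by simp
      set N : Int := ((x :: xs).length : Int) with hN
      have hNn : N = (n : Int) := by rw [hN, hlen]
      have hN1 : 1 ≤ N := by omega
      have hC1 : 1 ≤ (N + rs - 1) / rs := by
        rw [Int.le_ediv_iff_mul_le hrs]; omega
      have hcnt : cnt rs (x :: xs) = ((N + rs - 1) / rs).toNat := by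
        unfold cnt; rw [if_pos hpos]
      obtain ⟨C0, hC⟩ : ∃ C0, cnt rs (x :: xs) = C0 + 1 :=
        ⟨cnt rs (x :: xs) - 1, by rw [hcnt]; omega⟩
      rw [hC, List.range_succ_eq_map, List.map_cons, List.map_map, chunks_cons]
      obtain ⟨m, hm⟩ : ∃ m, rs.toNat = m + 1 := ⟨rs.toNat - 1, by omega⟩
      congr 1
      · -- head row
        simp only [Nat.cast_zero, mul_zero, zero_add, PySem.List.slice_zero_start]
        rw [PySem.List.slice_to _ (le_of_lt hrs), hm, List.take_succ_cons]
        congr 1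
      · -- tail rows: shift each window, apply the IH to the dropped list
        have hpt : ∀ k ∈ List.range C0,
            ((fun k : Nat => PySem.List.slice (x :: xs) (some (rs * k)) (some (rs * k + rs))) ∘ Nat.succ) k =
              PySem.List.slice ((x :: xs).drop rs.toNat) (some (rs * (k : Int))) (some (rs * (k : Int) + rs)) := by
          intro k _
          have h1 : rs * ((k.succ : Nat) : Int) = rs * (k : Int) + rs := by push_cast; ring
          simp only [Function.comp_apply, h1]
          exact slice_shift (x :: xs) (rs * (k : Int)) rs (by positivity) (le_of_lt hrs)
        rw [List.map_congr_left hpt]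
        have hdrop_eq : (x :: xs).drop rs.toNat = xs.drop (rs.toNat - 1) := by
          rw [hm, List.drop_succ_cons]
          congr 1
        rw [← hdrop_eq]
        have hdl : ((x :: xs).drop rs.toNat).length = n - rs.toNat := by
          simp [hlen]
        have hih := ih (n - rs.toNat) (by omega) ((x :: xs).drop rs.toNat) hdl
        have hcnt' : cnt rs ((x :: xs).drop rs.toNat) = C0 := by
          by_cases hsm : rs.toNat < n
          · have hL : (((x :: xs).drop rs.toNat).length : Int) = N - rs := by
              rw [hdl]; omega
            have hpos' : (0 : Int) < (((x :: xs).drop rs.toNat).length : Int) := by omega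
            have hstep : (N + rs - 1) / rs = (N - 1) / rs + 1 := by
              have h2 : N + rs - 1 = (N - 1) + 1 * rs := by ring
              rw [h2, Int.add_mul_ediv_right _ _ (by omega : rs ≠ 0)]
            have hnn : 0 ≤ (N - 1) / rs := Int.ediv_nonneg (by omega) (by omega)
            have : cnt rs ((x :: xs).drop rs.toNat) = ((N - rs + rs - 1) / rs).toNat := by
              unfold cnt; rw [if_pos hpos', hL]
            have h3 : N - rs + rs - 1 = N - 1 := by ring
            rw [h3] at this
            omega
          · have hdnil : (x :: xs).drop rs.toNat = [] := List.drop_eq_nil_of_le (by omega)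
            have hlt2 : (N + rs - 1) / rs < 2 := by
              rw [Int.ediv_lt_iff_lt_mul hrs]; omega
            have hc0 : cnt rs ((x :: xs).drop rs.toNat) = 0 := by
              rw [hdnil]; simp [cnt]
            omega
        rw [← hcnt', hih]

-- B's fold step, named
def stepB (rs : Int) (st : List (List Int) × List Int) (x : Int) : List (List Int) × List Int :=
  let row := st.2 ++ [x]
  if (row.length : Int) = rs then (st.1 ++ [row], []) else (st.1, row)

-- prepending rows to the accumulator commutes with B's loop
theorem foldl_stepB_acc (rs : Int) (xs : List Int) (op : List (List Int)) (row : List Int) :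
    xs.foldl (stepB rs) (op, row) =
      (op ++ (xs.foldl (stepB rs) ([], row)).1, (xs.foldl (stepB rs) ([], row)).2) := by
  induction xs generalizing op row with
  | nil => simp
  | cons x xs ih =>
    simp only [List.foldl_cons, stepB]
    by_cases h : (((row ++ [x]).length : Nat) : Int) = rs
    · rw [if_pos h, if_pos h]
      simp only [List.nil_append]
      rw [ih (op ++ [row ++ [x]]) [], ih [row ++ [x]] []]
      simp
    · rw [if_neg h, if_neg h]
      exact ih op (row ++ [x])

-- the rows formed from a partial row followed by the remaining elements
def rowsFrom (rs : Nat) (row : List Int) : List Int → List (List Int)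
  | [] => if row = [] then [] else [row]
  | x :: xs => if row.length + 1 = rs then (row ++ [x]) :: rowsFrom rs [] xs else rowsFrom rs (row ++ [x]) xs

-- finishing B's fold state yields the padded rows of rowsFrom
theorem foldl_stepB_eq_rowsFrom (rs : Int) (fe : Option Int) (hrs : 0 < rs) :
    ∀ (xs row : List Int), row.length < rs.toNat →
      (let st := xs.foldl (stepB rs) ([], row)
       if st.2 ≠ [] then
         match fe with
         | some v => st.1 ++ [st.2 ++ PySem.List.pyRepeat [v] (rs - st.2.length)]
         | none => st.1 ++ [st.2]
       else st.1) = (rowsFrom rs.toNat row xs).map (padIf rs fe) := by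
  intro xs
  induction xs with
  | nil =>
    intro row hrow
    simp only [List.foldl_nil, rowsFrom]
    by_cases h : row = []
    · simp [h]
    · have hlt : (row.length : Int) < rs := by omega
      cases fe with
      | none => simp [h, padIf]
      | some v => simp [h, padIf, if_pos hlt]
  | cons x xs ih =>
    intro row hrow
    simp only [List.foldl_cons, stepB, rowsFrom]
    by_cases h : row.length + 1 = rs.toNat
    · have hInt : (((row ++ [x]).length : Nat) : Int) = rs := by
        simp only [List.length_append, List.length_cons, List.length_nil]
        omega
      rw [if_pos hInt, foldl_stepB_acc, if_pos h]
      simp only [List.nil_append]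
      have hih := ih [] (by simp only [List.length_nil]; omega)
      simp only at hih
      have hfull : padIf rs fe (row ++ [x]) = row ++ [x] := by
        cases fe with
        | none => rfl
        | some v =>
          simp only [padIf]
          rw [if_neg (by rw [hInt]; omega)]
      cases hst : (xs.foldl (stepB rs) ([], [])).2 == [] with
      | true =>
        have hst' : (xs.foldl (stepB rs) ([], [])).2 = [] := by simpa using hst
        rw [hst'] at hih ⊢
        simp only [ne_eq, not_true_eq_false, if_false] at hih ⊢
        simp [hih, hfull]
      | false =>
        have hst' : ¬ (xs.foldl (stepB rs) ([], [])).2 = [] := by simpa using hst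
        rw [if_pos hst'] at hih
        rw [List.map_cons, hfull, ← hih]
        cases fe with
        | none => simp [if_pos hst']
        | some v => simp [if_pos hst']
    · have hInt : ¬ (((row ++ [x]).length : Nat) : Int) = rs := by
        simp only [List.length_append, List.length_cons, List.length_nil]
        omega
      rw [if_neg hInt, if_neg h]
      exact ih (row ++ [x]) (by simp only [List.length_append, List.length_cons, List.length_nil]; omega)

-- rowsFrom of a partial row is chunking of the concatenation
theorem rowsFrom_eq_chunks (rs : Nat) (hrs : 0 < rs) :
    ∀ (xs row : List Int), row.length < rs →
      rowsFrom rs row xs = chunks rs (row ++ xs) := by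
  intro xs
  induction xs with
  | nil =>
    intro row hrow
    match row with
    | [] => simp [rowsFrom, chunks_nil]
    | r :: rr =>
      simp only [rowsFrom, List.append_nil]
      rw [if_neg (by simp), chunks_cons]
      have h1 : rr.take (rs - 1) = rr := List.take_of_length_le (by simp at hrow; omega)
      have h2 : rr.drop (rs - 1) = [] := List.drop_eq_nil_of_le (by simp at hrow; omega)
      rw [h1, h2, chunks_nil]
  | cons x xs ih =>
    intro row hrow
    simp only [rowsFrom]
    by_cases h : row.length + 1 = rs
    · rw [if_pos h, ih [] hrs]
      match row with
      | [] =>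
        have hrs1 : rs = 1 := by simp at h; omega
        subst hrs1
        simp only [List.nil_append]
        rw [chunks_cons]
        simp
      | r :: rr =>
        have hrr : rr.length = rs - 2 := by simp at h; omega
        have hrs2 : 2 ≤ rs := by simp at h; omega
        rw [show ((r :: rr) ++ x :: xs) = r :: (rr ++ x :: xs) from by simp, chunks_cons]
        have htake : (rr ++ x :: xs).take (rs - 1) = rr ++ [x] := by
          rw [List.take_append]
          have h1 : rr.take (rs - 1) = rr := List.take_of_length_le (by omega)
          have h2 : rs - 1 - rr.length = 1 := by omega
          rw [h1, h2]
          rfl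
        have hdrop : (rr ++ x :: xs).drop (rs - 1) = xs := by
          rw [List.drop_append]
          have h1 : rr.drop (rs - 1) = [] := List.drop_eq_nil_of_le (by omega)
          have h2 : rs - 1 - rr.length = 1 := by omega
          rw [h1, h2]
          rfl
        rw [htake, hdrop]
        simp
    · rw [if_neg h, ih (row ++ [x]) (by simp; omega)]
      simp

-- A equals the padded canonical chunks
theorem list_2d_eq_chunks (arr : List Int) (rs : Int) (fe : Option Int) (hrs : 0 < rs) :
    list_2d arr rs fe = (chunks rs.toNat arr).map (padIf rs fe) := by
  unfold list_2d
  rw [foldl_append_singleton]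
  rw [show (fun i => (
        let row := PySem.List.slice arr (some i) (some (i + rs))
        match fe with
        | some v =>
            if (row.length : Int) < rs then
              row ++ PySem.List.pyRepeat [v] (rs - row.length)
            else row
        | none => row)) =
      (padIf rs fe) ∘ (fun i => PySem.List.slice arr (some i) (some (i + rs))) from by
    funext i; cases fe <;> rfl]
  rw [PySem.List.pyRange_of_pos 0 _ hrs]
  have hcnt : (if (0:Int) < (arr.length : Int) then ((((arr.length : Int)) - 0 + rs - 1) / rs).toNat else 0) = cnt rs arr := by
    unfold cnt
    rw [Int.sub_zero]
  rw [hcnt, ← map_slice_eq_chunks rs hrs arr.length arr rfl, List.map_map, List.map_map]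
  apply List.map_congr_left
  intro k _
  simp only [Function.comp_apply, zero_add]

-- B equals the padded canonical chunks
theorem list_2d_alt_eq_chunks (arr : List Int) (rs : Int) (fe : Option Int) (hrs : 0 < rs) :
    list_2d_alt arr rs fe = (chunks rs.toNat arr).map (padIf rs fe) := by
  unfold list_2d_alt
  have hfold : arr.foldl
      (fun (st : List (List Int) × List Int) x =>
        let row := st.2 ++ [x]
        if (row.length : Int) = rs then (st.1 ++ [row], []) else (st.1, row))
      ([], []) = arr.foldl (stepB rs) ([], []) := rfl
  rw [hfold]
  have h := foldl_stepB_eq_rowsFrom rs fe hrs arr [] (by simp only [List.length_nil]; omega)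
  simp only at h
  rw [h, rowsFrom_eq_chunks rs.toNat (by omega) arr [] (by simp only [List.length_nil]; omega)]
  simp

-- ===== VERDICT (by name: the statements are the Claim_ definitions above) =====
theorem list_2d_spec : Claim_equal_list_2d := by
  unfold Claim_equal_list_2d
  intro arr rs fe _ hpre
  unfold Spec_list_2d
  unfold Pre_list_2d at hpre
  rw [list_2d_eq_chunks arr rs fe (by omega), list_2d_alt_eq_chunks arr rs fe (by omega)]
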